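-- pv_equiv track=rewrite | github.com/theohsiung/cortex | general_task/tools/_manager.py | _generate_alias_suffixes
-- ===== SOURCE A (Python) =====
-- def _generate_alias_suffixes(max_depth: int = 3) -> list[str]:
--     """Generate all permutations of noise tokens up to max_depth.
--
--     gpt-oss models hallucinate suffixes like <|channel|>commentary, json,
--     and combinations thereof. Rather than hardcoding each pattern, we
--     generate all products of the three tokens up to max_depth so any
--     future combination is automatically covered.
--     """
--     import itertools
--
--     noise_tokens = ["json", "commentary", "<|channel|>"]
--     suffixes: set[str] = set()
--     for depth in range(1, max_depth + 1):
--         for combo in itertools.product(noise_tokens, repeat=depth):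
--             suffixes.add("".join(combo))
--     return list(suffixes)
-- ===== SOURCE B (Python) =====
-- def _generate_alias_suffixes(max_depth: int = 3) -> list[str]:
--     """Same suffix set, built layer by layer: no itertools, no ''.join.
--
--     Each layer extends the previous layer's strings by every token, which
--     enumerates the depth-d concatenations directly instead of re-joining
--     every token tuple from scratch.
--     """
--     noise_tokens = ["json", "commentary", "<|channel|>"]
--     suffixes: set[str] = set()
--     layer = [""]
--     for _ in range(max_depth):
--         layer = [prefix + tok for prefix in layer for tok in noise_tokens]
--         suffixes.update(layer)
--     return list(suffixes)
-- ===== Notes on version B (the rewrite author's own statement) =====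
-- stated objective: simpler
-- what changed: Drops itertools.product and ''.join: each layer of suffixes is built by extending the previous layer's strings with every token (same set-insertion order), instead of re-joining every token tuple of each depth from scratch.
import Mathlib
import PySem

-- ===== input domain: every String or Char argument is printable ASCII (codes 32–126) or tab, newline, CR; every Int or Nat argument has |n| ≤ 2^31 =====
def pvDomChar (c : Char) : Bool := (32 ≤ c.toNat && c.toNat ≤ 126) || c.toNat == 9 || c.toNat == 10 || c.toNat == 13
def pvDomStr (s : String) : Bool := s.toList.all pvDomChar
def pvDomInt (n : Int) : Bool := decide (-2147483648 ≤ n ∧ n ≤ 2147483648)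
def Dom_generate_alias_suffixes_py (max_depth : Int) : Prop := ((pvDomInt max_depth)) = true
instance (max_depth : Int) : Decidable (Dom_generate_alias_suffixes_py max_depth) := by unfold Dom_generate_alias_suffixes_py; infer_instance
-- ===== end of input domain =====

-- B drops itertools.product and ''.join, building each depth's suffixes by extending the
-- previous layer's strings with every token (same set, same insertion order).

-- ===== PORT A =====
-- itertools.product(tokens, repeat=n), transliterated from its documented list-building
-- equivalent (result = [x+[y] for x in result for y in pool], one round per repetition).
def pvProduct (tokens : List String) : Nat → List (List String)
  | 0 => [[]]
  | n + 1 => (pvProduct tokens n).flatMap (fun combo => tokens.map (fun t => combo ++ [t]))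

def generate_alias_suffixes_py (max_depth : Int) : List String :=
  let noise_tokens : List String := ["json", "commentary", "<|channel|>"]
  let suffixes : PySem.Set String :=
    (PySem.List.pyRange 1 (max_depth + 1) 1).foldl
      (fun s depth =>
        (pvProduct noise_tokens depth.toNat).foldl
          (fun s combo => PySem.Set.add s (PySem.Str.join "" combo)) s)
      PySem.Set.empty
  suffixes

-- ===== PORT B =====
def generate_alias_suffixes_py_alt (max_depth : Int) : List String :=
  let noise_tokens : List String := ["json", "commentary", "<|channel|>"]
  ((PySem.List.pyRange 0 max_depth 1).foldl
    (fun (st : PySem.Set String × List String) _ =>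
      let layer := st.2.flatMap (fun pre => noise_tokens.map (fun t => pre ++ t))
      (PySem.Set.update st.1 layer, layer))
    (PySem.Set.empty, [""])).1

-- ===== PRECONDITION & SPEC =====
def Spec_generate_alias_suffixes_py (max_depth : Int) (out : List String) : Prop := out = generate_alias_suffixes_py_alt max_depth
instance (max_depth : Int) (out : List String) : Decidable (Spec_generate_alias_suffixes_py max_depth out) := by unfold Spec_generate_alias_suffixes_py; infer_instance

-- ===== CLAIM (what is proved, stated in full; the proofs are below) =====
def Claim_equal_generate_alias_suffixes_py : Prop := ∀ (max_depth : Int), Dom_generate_alias_suffixes_py max_depth → Spec_generate_alias_suffixes_py max_depth (generate_alias_suffixes_py max_depth)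

-- ===== LEMMAS AND PROOFS =====

-- pvLayer n = all concatenations of exactly n tokens (product order); pvAll n = depths 1..n.
def pvLayer : Nat → List String
  | 0 => [""]
  | n + 1 => (pvLayer n).flatMap
      (fun p => (["json", "commentary", "<|channel|>"] : List String).map (fun t => p ++ t))

def pvAll (n : Nat) : List String := (List.range n).flatMap (fun i => pvLayer (i + 1))

def pvAllSeqs (n : Nat) : List (List String) :=
  (List.range n).flatMap (fun i => pvProduct ["json", "commentary", "<|channel|>"] (i + 1))

theorem pv_layer_succ (n : Nat) : pvLayer (n + 1) = (pvLayer n).flatMap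
    (fun p => (["json", "commentary", "<|channel|>"] : List String).map (fun t => p ++ t)) := rfl

-- ''.join distributes over cons and over append-of-singleton
theorem pv_join_cons (a : String) (r : List String) :
    PySem.Str.join "" (a :: r) = a ++ PySem.Str.join "" r := by
  cases r with
  | nil => simp [PySem.Str.join]
  | cons b r' =>
    rw [← String.toList_inj]
    simp [PySem.Str.join, PySem.Chars.join_cons_cons, String.toList_append]

theorem pv_join_app (l : List String) (t : String) :
    PySem.Str.join "" (l ++ [t]) = PySem.Str.join "" l ++ t := by
  induction l with
  | nil => simp [PySem.Str.join]
  | cons a r ih => rw [List.cons_append, pv_join_cons, pv_join_cons, ih, String.append_assoc]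

theorem pv_mapJoin (n : Nat) :
    (pvProduct ["json", "commentary", "<|channel|>"] n).map (PySem.Str.join "") = pvLayer n := by
  induction n with
  | zero => simp [pvProduct, pvLayer, PySem.Str.join]
  | succ n ih =>
    rw [pvProduct, pv_layer_succ, ← ih, List.map_flatMap, List.flatMap_map]
    refine List.flatMap_congr (fun c _ => ?_)
    simp [pv_join_app]

-- every member of pvProduct has length n and consists of tokens
theorem pv_prodSpec (n : Nat) (c : List String)
    (hc : c ∈ pvProduct ["json", "commentary", "<|channel|>"] n) :
    c.length = n ∧ ∀ x ∈ c, x ∈ (["json", "commentary", "<|channel|>"] : List String) := by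
  induction n generalizing c with
  | zero => simp [pvProduct] at hc; simp [hc]
  | succ n ih =>
    rw [pvProduct, List.mem_flatMap] at hc
    obtain ⟨combo, hcombo, hc⟩ := hc
    rw [List.mem_map] at hc
    obtain ⟨t, ht, rfl⟩ := hc
    obtain ⟨hlen, hmem⟩ := ih combo hcombo
    refine ⟨by simp [hlen], fun x hx => ?_⟩
    rcases List.mem_append.mp hx with h | h
    · exact hmem x h
    · simp only [List.mem_singleton] at h; subst h; exact ht

-- a token followed by anything is never the empty string
theorem pv_tok_ne_empty (a : String)
    (ha : a ∈ (["json", "commentary", "<|channel|>"] : List String)) (x : String) :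
    a ++ x ≠ "" := by
  intro h
  have h' := congrArg String.toList h
  simp at ha
  rcases ha with rfl | rfl | rfl <;> simp [String.toList_append] at h'

-- the tokens start with distinct characters, so the code they form is prefix-free
theorem pv_headInj (a : String) (ha : a ∈ (["json", "commentary", "<|channel|>"] : List String))
    (b : String) (hb : b ∈ (["json", "commentary", "<|channel|>"] : List String))
    (x y : String) (h : a ++ x = b ++ y) : a = b ∧ x = y := by
  simp at ha hb
  rcases ha with rfl | rfl | rfl <;> rcases hb with rfl | rfl | rfl
  all_goals first
    | exact ⟨rfl, (String.append_right_inj _).mp h⟩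
    | (exfalso; have h' := congrArg String.toList h; simp [String.toList_append] at h')

-- ''.join is injective on token sequences
theorem pv_joinInj (l1 l2 : List String)
    (h1 : ∀ x ∈ l1, x ∈ (["json", "commentary", "<|channel|>"] : List String))
    (h2 : ∀ x ∈ l2, x ∈ (["json", "commentary", "<|channel|>"] : List String))
    (h : PySem.Str.join "" l1 = PySem.Str.join "" l2) : l1 = l2 := by
  induction l1 generalizing l2 with
  | nil =>
    cases l2 with
    | nil => rfl
    | cons b r2 =>
      rw [pv_join_cons] at h
      exact absurd h.symm (pv_tok_ne_empty b (h2 b (by simp)) _)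
  | cons a r1 ih =>
    cases l2 with
    | nil =>
      rw [pv_join_cons] at h
      exact absurd h (pv_tok_ne_empty a (h1 a (by simp)) _)
    | cons b r2 =>
      rw [pv_join_cons, pv_join_cons] at h
      obtain ⟨hab, hj⟩ := pv_headInj a (h1 a (by simp)) b (h2 b (by simp)) _ _ h
      have hr := ih r2 (fun x hx => h1 x (List.mem_cons_of_mem _ hx))
        (fun x hx => h2 x (List.mem_cons_of_mem _ hx)) hj
      rw [hab, hr]

theorem pv_nodupT : (["json", "commentary", "<|channel|>"] : List String).Nodup := by decide

theorem pv_nodupProd (n : Nat) : (pvProduct ["json", "commentary", "<|channel|>"] n).Nodup := by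
  induction n with
  | zero => simp [pvProduct]
  | succ n ih =>
    rw [pvProduct, List.nodup_flatMap]
    refine ⟨fun c _ => pv_nodupT.map (fun t t' h => by simpa using List.append_cancel_left h), ?_⟩
    refine List.Pairwise.imp_of_mem ?_ ih
    intro c1 c2 hc1 hc2 hne x hx1 hx2
    rw [List.mem_map] at hx1 hx2
    obtain ⟨t1, _, rfl⟩ := hx1
    obtain ⟨t2, _, heq⟩ := hx2
    exact hne ((List.append_inj heq
      ((pv_prodSpec n c2 hc2).1.trans (pv_prodSpec n c1 hc1).1.symm)).1.symm)

theorem pv_nodupAllSeqs (n : Nat) : (pvAllSeqs n).Nodup := by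
  rw [pvAllSeqs, List.nodup_flatMap]
  refine ⟨fun i _ => pv_nodupProd (i + 1), ?_⟩
  refine List.Pairwise.imp_of_mem ?_ (List.nodup_range)
  intro i j _ _ hne c hci hcj
  have hi := (pv_prodSpec _ _ hci).1
  have hj := (pv_prodSpec _ _ hcj).1
  exact hne (by omega)

theorem pv_all_eq_map_join (n : Nat) :
    pvAll n = (pvAllSeqs n).map (PySem.Str.join "") := by
  rw [pvAll, pvAllSeqs, List.map_flatMap]
  exact List.flatMap_congr (fun i _ => (pv_mapJoin (i + 1)).symm)

theorem pv_nodupAll (n : Nat) : (pvAll n).Nodup := by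
  rw [pv_all_eq_map_join]
  refine (pv_nodupAllSeqs n).map_on ?_
  intro c1 hc1 c2 hc2 h
  rw [pvAllSeqs, List.mem_flatMap] at hc1 hc2
  obtain ⟨i, _, hc1⟩ := hc1
  obtain ⟨j, _, hc2⟩ := hc2
  exact pv_joinInj c1 c2 (pv_prodSpec _ _ hc1).2 (pv_prodSpec _ _ hc2).2 h

theorem pv_all_succ (n : Nat) : pvAll (n + 1) = pvAll n ++ pvLayer (n + 1) := by
  rw [pvAll, pvAll, List.range_succ, List.flatMap_append]
  simp

-- A's fold over depths computes pvAll n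
theorem pv_A_fold (n : Nat) :
    (PySem.List.pyRange 1 ((n : Int) + 1) 1).foldl
      (fun s depth =>
        (pvProduct ["json", "commentary", "<|channel|>"] depth.toNat).foldl
          (fun s combo => PySem.Set.add s (PySem.Str.join "" combo)) s)
      PySem.Set.empty = pvAll n := by
  induction n with
  | zero =>
    rw [show ((0 : Nat) : Int) + 1 = 1 by norm_num, PySem.List.pyRange_one_eq_nil le_rfl]
    rfl
  | succ n ih =>
    rw [show (((n + 1 : Nat) : Int)) + 1 = ((n : Int) + 1) + 1 by push_cast; ring,
      PySem.List.pyRange_one_succ_right (by omega), List.foldl_append, ih]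
    show (pvProduct ["json", "commentary", "<|channel|>"] ((n : Int) + 1).toNat).foldl
        (fun s combo => PySem.Set.add s (PySem.Str.join "" combo)) (pvAll n) = pvAll (n + 1)
    rw [show ((n : Int) + 1).toNat = n + 1 by omega,
      ← PySem.Set.update_map_eq_foldl_add, pv_mapJoin]
    have hnd := pv_nodupAll (n + 1)
    rw [pv_all_succ] at hnd
    rw [PySem.Set.update_eq_append_of_disjoint (pvAll n) (pvLayer (n + 1))
      (List.Nodup.of_append_right hnd)
      (fun x hx hxs => (List.disjoint_of_nodup_append hnd) hxs hx), ← pv_all_succ]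

-- B's fold computes (pvAll n, pvLayer n)
theorem pv_B_fold (n : Nat) :
    (PySem.List.pyRange 0 (n : Int) 1).foldl
      (fun (st : PySem.Set String × List String) _ =>
        (PySem.Set.update st.1 (st.2.flatMap
            (fun p => (["json", "commentary", "<|channel|>"] : List String).map (fun t => p ++ t))),
         st.2.flatMap
            (fun p => (["json", "commentary", "<|channel|>"] : List String).map (fun t => p ++ t))))
      (PySem.Set.empty, [""]) = (pvAll n, pvLayer n) := by
  induction n with
  | zero => rw [show ((0 : Nat) : Int) = 0 by norm_num, PySem.List.pyRange_one_eq_nil le_rfl]; rfl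
  | succ n ih =>
    rw [show ((n + 1 : Nat) : Int) = (n : Int) + 1 by push_cast; ring,
      PySem.List.pyRange_one_succ_right (by omega), List.foldl_append, ih]
    show (PySem.Set.update (pvAll n) ((pvLayer n).flatMap
        (fun p => (["json", "commentary", "<|channel|>"] : List String).map (fun t => p ++ t))),
      (pvLayer n).flatMap
        (fun p => (["json", "commentary", "<|channel|>"] : List String).map (fun t => p ++ t)))
      = (pvAll (n + 1), pvLayer (n + 1))
    rw [← pv_layer_succ]
    have hnd := pv_nodupAll (n + 1)
    rw [pv_all_succ] at hnd
    rw [PySem.Set.update_eq_append_of_disjoint (pvAll n) (pvLayer (n + 1))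
      (List.Nodup.of_append_right hnd)
      (fun x hx hxs => (List.disjoint_of_nodup_append hnd) hxs hx), ← pv_all_succ]

-- the two ports agree on every nonnegative depth
theorem pv_final (n : Nat) :
    generate_alias_suffixes_py (n : Int) = generate_alias_suffixes_py_alt (n : Int) := by
  show ((PySem.List.pyRange 1 ((n : Int) + 1) 1).foldl
      (fun s depth =>
        (pvProduct ["json", "commentary", "<|channel|>"] depth.toNat).foldl
          (fun s combo => PySem.Set.add s (PySem.Str.join "" combo)) s)
      PySem.Set.empty : List String) =
    ((PySem.List.pyRange 0 (n : Int) 1).foldl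
      (fun (st : PySem.Set String × List String) _ =>
        (PySem.Set.update st.1 (st.2.flatMap
            (fun p => (["json", "commentary", "<|channel|>"] : List String).map (fun t => p ++ t))),
         st.2.flatMap
            (fun p => (["json", "commentary", "<|channel|>"] : List String).map (fun t => p ++ t))))
      (PySem.Set.empty, [""])).1
  rw [pv_A_fold n, pv_B_fold n]

-- ===== VERDICT (by name: the statement is the Claim_ definition above) =====
theorem generate_alias_suffixes_py_spec : Claim_equal_generate_alias_suffixes_py := by
  intro max_depth _
  show generate_alias_suffixes_py max_depth = generate_alias_suffixes_py_alt max_depth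
  by_cases h : max_depth ≤ 0
  · unfold generate_alias_suffixes_py generate_alias_suffixes_py_alt
    rw [PySem.List.pyRange_one_eq_nil (by omega : max_depth + 1 ≤ 1),
        PySem.List.pyRange_one_eq_nil (by omega : max_depth ≤ (0 : Int))]
    rfl
  · have h0 : max_depth = (max_depth.toNat : Int) := by omega
    rw [h0]
    exact pv_final max_depth.toNat
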